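-- pv_equiv track=rewrite | github.com/david-lazar/IDAPatternSearch | IDAPatternSearch_utils/IDAPatternSearch.py | _parse_ghidra_pattern_item
-- ===== SOURCE A (Python) =====
-- def _parse_ghidra_pattern_item(pattern_item, element_length):
--     '''
--     This function parses a given Ghidra pattern item (pattern_item) which is one item from a Ghidra pattern.
--     The function also uses (element_length) to determine if it is:
--         * Hex item (starting with 0x which was already omitted before calling this function)
--           which in this case (element_length) == 4
--         * Bitfield item
--           which in this case (element_length) == 1
--     The '.' characther in both item types represents a wildcard Bit/Byte depends on the item type (Hex/Bitfield).
--     This function returns two values: (image, mask)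
--         * image - represents the item image to search by the pattern.
--         * mask -  represents the item mask that can be used to mask out the matched bytes and check against the image
--     '''
--     cur_image = 0
--     cur_mask = 0
--     for element in pattern_item:
--         if element == '.':
--             # Wildcard element
--             # mask should be zeros (in bits), image should be zero (lets say 0)
--             cur_mask = cur_mask << element_length
--             cur_image = cur_image << element_length
--         else:
--             # mask should be 1's (in bits), image is same as half_byte
--             cur_mask = cur_mask << element_length
--             if element_length == 1:
--                 # bit element
--                 cur_mask += 1
--             else:
--                 # half byte element
--                 cur_mask += 0xf
--
--             cur_image = cur_image << element_length
--             if element_length == 1: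
--                 # bit element
--                 cur_image += int(element, 2)
--             else:
--                 # half byte element
--                 cur_image += int(element, 16)
--     return cur_image, cur_mask
-- ===== SOURCE B (Python) =====
-- def _parse_ghidra_pattern_item(pattern_item, element_length):
--     # Right-to-left positional accumulation: each non-wildcard digit is parsed
--     # once and added at its place value; no running shift/accumulate state.
--     base = 2 if element_length == 1 else 16
--     mask_digit = 1 if element_length == 1 else 0xf
--     image = 0
--     mask = 0
--     for i, element in enumerate(reversed(pattern_item)):
--         if element != '.':
--             image += int(element, base) << (element_length * i)
--             mask += mask_digit << (element_length * i)
--     return image, mask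
-- ===== Notes on version B (the rewrite author's own statement) =====
-- stated objective: alternative
-- what changed: Replaces A's left-to-right shift-and-accumulate state machine (image/mask shifted and extended per character) by a right-to-left positional sum over enumerate(reversed(item)) that parses each non-wildcard digit once and adds it at its place value.
import Mathlib
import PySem

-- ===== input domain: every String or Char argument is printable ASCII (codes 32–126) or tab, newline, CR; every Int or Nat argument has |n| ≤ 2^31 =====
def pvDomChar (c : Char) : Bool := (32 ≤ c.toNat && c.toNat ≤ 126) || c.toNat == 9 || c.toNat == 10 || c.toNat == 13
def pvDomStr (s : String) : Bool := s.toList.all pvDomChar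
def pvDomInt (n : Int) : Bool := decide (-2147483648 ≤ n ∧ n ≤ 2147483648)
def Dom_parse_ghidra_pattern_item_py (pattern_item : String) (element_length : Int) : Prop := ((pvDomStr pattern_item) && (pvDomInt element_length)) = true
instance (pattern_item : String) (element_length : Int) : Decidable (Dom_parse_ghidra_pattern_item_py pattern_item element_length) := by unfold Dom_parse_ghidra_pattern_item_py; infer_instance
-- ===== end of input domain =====

-- B replaces A's left-to-right shift/accumulate state machine by a right-to-left
-- positional sum (each non-wildcard digit added once at its place value); objective: alternative.

-- ===== PORT A =====
-- int(c, 2) for a single char (exact on '0'/'1'; other chars raise in Python and are outside Pre_)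
def pvBitVal (c : Char) : Int := if c = '0' then 0 else if c = '1' then 1 else 0
-- int(c, 16) for a single char (exact on hex digits; other chars raise in Python and are outside Pre_)
def pvHexVal (c : Char) : Int :=
  if '0' ≤ c ∧ c ≤ '9' then (c.toNat : Int) - 48
  else if 'a' ≤ c ∧ c ≤ 'f' then (c.toNat : Int) - 87
  else if 'A' ≤ c ∧ c ≤ 'F' then (c.toNat : Int) - 55
  else 0

-- one iteration of A's for-loop; 'x <<< element_length.toNat' is exact for Python's
-- 'x << element_length' since Pre_ guarantees 0 ≤ element_length (negative shifts raise)
def pvStepA (element_length : Int) (acc : Int × Int) (element : Char) : Int × Int :=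
  let cur_image := acc.1
  let cur_mask := acc.2
  if element = '.' then
    (cur_image <<< element_length.toNat, cur_mask <<< element_length.toNat)
  else
    let cur_mask := cur_mask <<< element_length.toNat
    let cur_mask := if element_length = 1 then cur_mask + 1 else cur_mask + 15
    let cur_image := cur_image <<< element_length.toNat
    let cur_image := if element_length = 1 then cur_image + pvBitVal element
                     else cur_image + pvHexVal element
    (cur_image, cur_mask)

def parse_ghidra_pattern_item_py (pattern_item : String) (element_length : Int) : Int × Int :=
  pattern_item.toList.foldl (pvStepA element_length) (0, 0)

-- ===== PORT B =====
-- int(element, base) of B (base = 2 iff element_length == 1)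
def pvIntOfDigit (element_length : Int) (c : Char) : Int :=
  if element_length = 1 then pvBitVal c else pvHexVal c

-- one iteration of B's for-loop over enumerate(reversed(pattern_item))
def pvStepB (element_length mask_digit : Int) (acc : Int × Int) (p : Int × Char) : Int × Int :=
  if p.2 ≠ '.' then
    (acc.1 + pvIntOfDigit element_length p.2 <<< (element_length * p.1).toNat,
     acc.2 + mask_digit <<< (element_length * p.1).toNat)
  else acc

def parse_ghidra_pattern_item_py_alt (pattern_item : String) (element_length : Int) : Int × Int :=
  let mask_digit : Int := if element_length = 1 then 1 else 15
  (PySem.List.enumerate pattern_item.toList.reverse).foldl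
    (pvStepB element_length mask_digit) (0, 0)

-- ===== PRECONDITION & SPEC =====
-- a char Python's int(c, base) accepts, base chosen by element_length as in A
def pvDigitOk (element_length : Int) (c : Char) : Bool :=
  if element_length = 1 then c == '0' || c == '1'
  else ('0' ≤ c && c ≤ '9') || ('a' ≤ c && c ≤ 'f') || ('A' ≤ c && c ≤ 'F')

-- exactly where Python A returns: on a non-empty item a negative shift amount or a
-- character that is neither '.' nor a digit of the chosen base raises ValueError
def Pre_parse_ghidra_pattern_item_py (pattern_item : String) (element_length : Int) : Prop :=
  pattern_item = "" ∨
    (0 ≤ element_length ∧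
      pattern_item.toList.all (fun c => c == '.' || pvDigitOk element_length c) = true)
instance (pattern_item : String) (element_length : Int) : Decidable (Pre_parse_ghidra_pattern_item_py pattern_item element_length) := by unfold Pre_parse_ghidra_pattern_item_py; infer_instance

def pvWitness_parse_ghidra_pattern_item_py : String × Int := ("1.f", 4)

def Spec_parse_ghidra_pattern_item_py (pattern_item : String) (element_length : Int) (out : Int × Int) : Prop := out = parse_ghidra_pattern_item_py_alt pattern_item element_length
instance (pattern_item : String) (element_length : Int) (out : Int × Int) : Decidable (Spec_parse_ghidra_pattern_item_py pattern_item element_length out) := by unfold Spec_parse_ghidra_pattern_item_py; infer_instance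

-- ===== CLAIM (what is proved, stated in full; the proofs are below) =====
def Claim_equal_parse_ghidra_pattern_item_py : Prop := ∀ (pattern_item : String) (element_length : Int), Dom_parse_ghidra_pattern_item_py pattern_item element_length → Pre_parse_ghidra_pattern_item_py pattern_item element_length → Spec_parse_ghidra_pattern_item_py pattern_item element_length (parse_ghidra_pattern_item_py pattern_item element_length)

-- ===== LEMMAS AND PROOFS =====

-- B's fold over the enumerated reversed suffix, as the proofs speak about it
def pvBF (element_length : Int) (t : List Char) : Int × Int :=
  (PySem.List.enumerate t.reverse).foldl
    (pvStepB element_length (if element_length = 1 then 1 else 15)) (0, 0)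

lemma pv_toNat_mul_natCast (L : Int) (n : Nat) : (L * (n : Int)).toNat = L.toNat * n := by
  have hd : 0 ≤ L ∨ L < 0 := by omega
  rcases hd with h | h
  · lift L to Nat using h
    rw [← Nat.cast_mul, Int.toNat_natCast, Int.toNat_natCast]
  · have h1 : L * (n : Int) ≤ 0 := mul_nonpos_of_nonpos_of_nonneg h.le (by positivity)
    have h2 : L.toNat = 0 := Int.toNat_of_nonpos h.le
    simp [Int.toNat_of_nonpos h1, h2]

lemma pvBF_cons (L : Int) (c : Char) (t : List Char) :
    pvBF L (c :: t) =
      pvStepB L (if L = 1 then 1 else 15) (pvBF L t) ((t.length : Int), c) := by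
  simp [pvBF, PySem.List.enumerate_append, List.foldl_append]

lemma pv_main (L : Int) (t : List Char) : ∀ (a b : Int),
    t.foldl (pvStepA L) (a, b) =
      (a * 2 ^ (L.toNat * t.length) + (pvBF L t).1,
       b * 2 ^ (L.toNat * t.length) + (pvBF L t).2) := by
  induction t with
  | nil => intro a b; simp [pvBF]
  | cons c t ih =>
    intro a b
    rw [List.foldl_cons, ih, pvBF_cons]
    simp only [pvStepA, pvStepB, pvIntOfDigit, Int.shiftLeft_eq, pv_toNat_mul_natCast,
      List.length_cons, Nat.mul_succ, pow_add, ne_eq]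
    by_cases hc : c = '.' <;> by_cases hL : L = 1 <;>
      simp only [hc, hL, if_true, if_false, not_true, not_false_iff, Prod.mk.injEq] <;>
      constructor <;> ring

-- ===== VERDICT (by name: the statement is the Claim_ definition above) =====
theorem parse_ghidra_pattern_item_py_spec : Claim_equal_parse_ghidra_pattern_item_py := by
  intro s L _ _
  unfold Spec_parse_ghidra_pattern_item_py
  show s.toList.foldl (pvStepA L) (0, 0) = _
  rw [pv_main]
  simp [parse_ghidra_pattern_item_py_alt, pvBF]
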